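-- pv_equiv track=rewrite | github.com/SIC98/keyword-generator-Pytorch | utils.py | get_data_until_kth_comma
-- ===== SOURCE A (Python) =====
-- def get_data_until_kth_comma(s, k, contain_last_comma):
--     index = -1
--     for _ in range(k):
--         index = s.find(",", index + 1)
--         # If there is not enough comma
--         if index == -1:
--             return s
--
--     if contain_last_comma:
--         index = index + 1
--
--     return s[:index]
-- ===== SOURCE B (Python) =====
-- def get_data_until_kth_comma(s, k, contain_last_comma):
--     # One pass: collect all comma positions, then index the k-th directly.
--     if k <= 0:
--         return ""
--     indices = [i for i, c in enumerate(s) if c == ","]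
--     if len(indices) < k:
--         return s
--     index = indices[k - 1] + 1 if contain_last_comma else indices[k - 1]
--     return s[:index]
-- ===== Notes on version B (the rewrite author's own statement) =====
-- stated objective: alternative
-- what changed: B replaces A's repeated s.find loop (k sequential find calls threading a moving index) with one enumerate pass that collects every comma position and then directly indexes the k-th one, and it returns "" for k <= 0 instead of letting the -1 sentinel leak into the slice.
-- intended difference: For k <= 0 with contain_last_comma false and a string of length >= 2, A returns s[:-1] (its -1 sentinel index leaks into the slice and silently drops the last character) while B returns "", the empty substring before the 0th comma, which is the intended value. — e.g. on get_data_until_kth_comma("ab", 0, false): A returns "a", B returns ""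
import Mathlib
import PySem

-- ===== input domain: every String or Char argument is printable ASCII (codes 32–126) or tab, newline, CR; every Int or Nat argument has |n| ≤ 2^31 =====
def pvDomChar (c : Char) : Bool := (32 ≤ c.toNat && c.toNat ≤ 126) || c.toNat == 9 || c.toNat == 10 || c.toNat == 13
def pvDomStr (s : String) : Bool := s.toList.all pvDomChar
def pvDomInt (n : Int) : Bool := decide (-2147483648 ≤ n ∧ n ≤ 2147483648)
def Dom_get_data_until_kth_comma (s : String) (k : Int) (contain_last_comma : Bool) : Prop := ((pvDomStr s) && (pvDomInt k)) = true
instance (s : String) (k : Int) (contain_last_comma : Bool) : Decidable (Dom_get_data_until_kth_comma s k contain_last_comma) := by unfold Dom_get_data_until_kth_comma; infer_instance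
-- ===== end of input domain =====

-- B rebuilds the result from a one-pass list of all comma positions instead of A's repeated s.find loop,
-- and for k ≤ 0 returns "" where A's -1 sentinel leaks into the slice (see D_ below).

-- ===== PORT A =====
-- the 'for _ in range(k)' loop: fuel = number of remaining iterations, state = index; none = early 'return s'
def pvLoopA (cs : List Char) (fuel : Nat) (index : Int) : Option Int :=
  match fuel with
  | 0 => some index
  | n + 1 =>
    let i := PySem.Chars.findFrom cs [','] (index + 1)
    if i = -1 then none else pvLoopA cs n i

def get_data_until_kth_comma (s : String) (k : Int) (contain_last_comma : Bool) : String :=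
  match pvLoopA s.toList k.toNat (-1) with
  | none => s
  | some index =>
    let index := if contain_last_comma then index + 1 else index
    String.ofList (PySem.List.slice s.toList none (some index))

-- ===== PORT B =====
-- indices = [i for i, c in enumerate(s) if c == ","]
def pvCommaIdx (cs : List Char) : List Int :=
  ((PySem.List.enumerate cs 0).filter (fun p => p.2 == ',')).map (·.1)

def get_data_until_kth_comma_alt (s : String) (k : Int) (contain_last_comma : Bool) : String :=
  if k ≤ 0 then ""
  else
    let indices := pvCommaIdx s.toList
    if (indices.length : Int) < k then s
    else
      let index := if contain_last_comma then PySem.List.pyGetD indices (k - 1) 0 + 1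
                   else PySem.List.pyGetD indices (k - 1) 0
      String.ofList (PySem.List.slice s.toList none (some index))

-- ===== PRECONDITION & SPEC =====
-- For k ≤ 0 (with contain_last_comma false and at least two characters) A's -1 sentinel leaks into the
-- slice and it returns s[:-1], silently dropping the last character; B returns "" — the substring before
-- the 0th comma — which is the intended value.
def D_get_data_until_kth_comma (s : String) (k : Int) (contain_last_comma : Bool) : Prop :=
  k ≤ 0 ∧ contain_last_comma = false ∧ 2 ≤ s.toList.length
instance (s : String) (k : Int) (contain_last_comma : Bool) : Decidable (D_get_data_until_kth_comma s k contain_last_comma) := by unfold D_get_data_until_kth_comma; infer_instance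

def Spec_get_data_until_kth_comma (s : String) (k : Int) (contain_last_comma : Bool) (out : String) : Prop := ¬ D_get_data_until_kth_comma s k contain_last_comma → out = get_data_until_kth_comma_alt s k contain_last_comma
instance (s : String) (k : Int) (contain_last_comma : Bool) (out : String) : Decidable (Spec_get_data_until_kth_comma s k contain_last_comma out) := by unfold Spec_get_data_until_kth_comma; infer_instance

def pvDiffWitness_get_data_until_kth_comma : String × Int × Bool := ("ab", 0, false)
def pvDiffWitnessOut_get_data_until_kth_comma : String × String := ("a", "")

-- ===== CLAIM (what is proved, stated in full; the proofs are below) =====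
def Claim_unchanged_get_data_until_kth_comma : Prop := ∀ (s : String) (k : Int) (contain_last_comma : Bool), Dom_get_data_until_kth_comma s k contain_last_comma → Spec_get_data_until_kth_comma s k contain_last_comma (get_data_until_kth_comma s k contain_last_comma)
def Claim_changed_get_data_until_kth_comma : Prop := Dom_get_data_until_kth_comma (pvDiffWitness_get_data_until_kth_comma.1) (pvDiffWitness_get_data_until_kth_comma.2.1) (pvDiffWitness_get_data_until_kth_comma.2.2) ∧ D_get_data_until_kth_comma (pvDiffWitness_get_data_until_kth_comma.1) (pvDiffWitness_get_data_until_kth_comma.2.1) (pvDiffWitness_get_data_until_kth_comma.2.2) ∧ get_data_until_kth_comma (pvDiffWitness_get_data_until_kth_comma.1) (pvDiffWitness_get_data_until_kth_comma.2.1) (pvDiffWitness_get_data_until_kth_comma.2.2) = pvDiffWitnessOut_get_data_until_kth_comma.1 ∧ get_data_until_kth_comma_alt (pvDiffWitness_get_data_until_kth_comma.1) (pvDiffWitness_get_data_until_kth_comma.2.1) (pvDiffWitness_get_data_until_kth_comma.2.2) = pvDiffWitnessOut_get_data_until_kth_comma.2 ∧ pvDiffWitnessOut_get_data_until_kth_comma.1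 ≠ pvDiffWitnessOut_get_data_until_kth_comma.2
def Claim_exact_get_data_until_kth_comma : Prop := ∀ (s : String) (k : Int) (contain_last_comma : Bool), Dom_get_data_until_kth_comma s k contain_last_comma → D_get_data_until_kth_comma s k contain_last_comma → get_data_until_kth_comma s k contain_last_comma ≠ get_data_until_kth_comma_alt s k contain_last_comma

-- ===== LEMMAS AND PROOFS =====

-- the value of A's loop variable 'index' after j successful iterations of its find loop
def pvPrev (xs : List Int) (j : Nat) : Int := if j = 0 then -1 else xs.getD (j - 1) 0

theorem pvCommaIdx_mem (cs : List Char) (i : Int) :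
    i ∈ pvCommaIdx cs ↔ ∃ n : Nat, ∃ h : n < cs.length, i = (n : Int) ∧ cs[n] = ',' := by
  simp [pvCommaIdx, List.mem_filter, PySem.List.mem_enumerate_iff]

theorem pvCommaIdx_pairwise (cs : List Char) : (pvCommaIdx cs).Pairwise (· < ·) := by
  have h := PySem.List.pairwise_lt_enumerate cs 0
  exact List.Pairwise.map _ (by intro a b hab; exact hab) (h.filter _)

theorem pvCommaIdx_nonneg (cs : List Char) : ∀ x ∈ pvCommaIdx cs, 0 ≤ x := by
  intro x hx
  obtain ⟨n, _, rfl, _⟩ := (pvCommaIdx_mem cs x).1 hx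
  positivity

theorem pvFilterDrop (xs : List Int) (hs : xs.Pairwise (· < ·)) (hn : ∀ x ∈ xs, 0 ≤ x)
    (j : Nat) (hj : j ≤ xs.length) :
    xs.filter (fun i => decide (pvPrev xs j + 1 ≤ i)) = xs.drop j := by
  have hpw := List.pairwise_iff_getElem.1 hs
  rcases Nat.eq_zero_or_pos j with rfl | hjpos
  · simp only [List.drop_zero]
    apply List.filter_eq_self.2
    intro a ha
    have h0 := hn a ha
    have hpv : pvPrev xs 0 = -1 := by simp [pvPrev]
    simp only [hpv, decide_eq_true_eq]
    omega
  · have hj1 : j - 1 < xs.length := by omega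
    have hprev : pvPrev xs j = xs[j-1] := by
      simp [pvPrev, Nat.pos_iff_ne_zero.1 hjpos, List.getD_eq_getElem?_getD,
        List.getElem?_eq_getElem hj1]
    set P := pvPrev xs j + 1 with hP
    conv_lhs => rw [← List.take_append_drop j xs]
    rw [List.filter_append]
    have h1 : (xs.take j).filter (fun i => decide (P ≤ i)) = [] := by
      apply List.filter_eq_nil_iff.2
      intro a ha
      obtain ⟨m, hm, rfl⟩ := List.mem_take_iff_getElem.1 ha
      have hmj : m < j := lt_min_iff.1 hm |>.1
      have : xs[m] ≤ xs[j-1] := by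
        rcases Nat.lt_or_ge m (j-1) with h | h
        · exact le_of_lt (hpw m (j-1) (by omega) hj1 h)
        · have : m = j - 1 := by omega
          simp [this]
      simp only [decide_eq_true_eq, hP, hprev]
      omega
    have h2 : (xs.drop j).filter (fun i => decide (P ≤ i)) = xs.drop j := by
      apply List.filter_eq_self.2
      intro a ha
      obtain ⟨m, hm, rfl⟩ := List.mem_drop_iff_getElem.1 (by simpa using ha)
      have : xs[j-1] < xs[j+m] := hpw (j-1) (j+m) (by omega) (by omega) (by omega)
      simp only [decide_eq_true_eq, hP, hprev]
      omega
    rw [h1, h2, List.nil_append]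

theorem pvSingletonPrefix (l : List Char) (c : Char) : [c] <+: l ↔ l.head? = some c := by
  constructor
  · rintro ⟨t, rfl⟩; rfl
  · intro h
    cases l with
    | nil => simp at h
    | cons a t => simp at h; exact ⟨t, by simp [h]⟩

theorem pvHeadSorted (l : List Int) (hl : l.Pairwise (· < ·)) (x : Int) (hx : x ∈ l)
    (hb : ∀ y ∈ l, x ≤ y) : l.headD (-1) = x := by
  cases l with
  | nil => simp at hx
  | cons a t =>
    simp only [List.headD_cons]
    rcases List.mem_cons.1 hx with rfl | hxt
    · rfl
    · have h1 : a < x := (List.pairwise_cons.1 hl).1 x hxt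
      have h2 : x ≤ a := hb a (List.mem_cons_self)
      omega

theorem pvFindNext (cs : List Char) (p : Nat) (hp : p ≤ cs.length) :
    PySem.Chars.findFrom cs [','] (p : Int) =
      ((pvCommaIdx cs).filter (fun i => decide ((p : Int) ≤ i))).headD (-1) := by
  rw [PySem.Chars.findFrom_natCast cs [','] p hp]
  by_cases hneg : PySem.Chars.find (cs.drop p) [','] = -1
  · rw [if_pos hneg]
    have hnm : ¬ (',' ∈ cs.drop p) := by
      have := (PySem.Chars.find_eq_neg_one_iff (cs.drop p) [',']).1 hneg
      simpa [List.singleton_infix_iff] using this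
    have : (pvCommaIdx cs).filter (fun i => decide ((p : Int) ≤ i)) = [] := by
      apply List.filter_eq_nil_iff.2
      intro a ha
      obtain ⟨n, hn, rfl, hc⟩ := (pvCommaIdx_mem cs a).1 ha
      simp only [decide_eq_true_eq]
      intro hpn
      have hpn' : p ≤ n := by exact_mod_cast hpn
      exact hnm (by
        have : (cs.drop p)[n - p]'(by simp; omega) = ',' := by
          rw [List.getElem_drop]; simp [Nat.add_sub_cancel' hpn', hc]
        rw [← this]; exact List.getElem_mem _)
    rw [this]; rfl
  · rw [if_neg hneg]
    set F := PySem.Chars.find (cs.drop p) [','] with hF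
    have h0 : 0 ≤ F := by
      have := PySem.Chars.neg_one_le_find (cs.drop p) [',']
      omega
    obtain ⟨hpre, hmin⟩ := PySem.Chars.find_spec h0
    rw [List.drop_drop, ← hF] at hpre
    rw [← hF] at hmin
    have hq : cs[p + F.toNat]? = some ',' := by
      rw [← List.head?_drop]
      exact (pvSingletonPrefix _ _).1 hpre
    have hqlen : p + F.toNat < cs.length := (List.getElem?_eq_some_iff.1 hq).1
    have hqval : cs[p + F.toNat]'hqlen = ',' := by
      rw [List.getElem?_eq_getElem hqlen] at hq
      exact Option.some.injEq _ _ ▸ (by simpa using hq)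
    have hcast : (p : Int) + F = ((p + F.toNat : Nat) : Int) := by
      push_cast [Int.toNat_of_nonneg h0]; ring
    rw [hcast]
    apply Eq.symm
    apply pvHeadSorted _ ((pvCommaIdx_pairwise cs).filter _)
    · refine List.mem_filter.2 ⟨(pvCommaIdx_mem cs _).2 ⟨p + F.toNat, hqlen, rfl, hqval⟩, ?_⟩
      simp
    · intro y hy
      obtain ⟨hy1, hy2⟩ := List.mem_filter.1 hy
      obtain ⟨n, hn, rfl, hc⟩ := (pvCommaIdx_mem cs y).1 hy1
      have hpn : p ≤ n := by simpa using hy2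
      by_contra hlt
      push_neg at hlt
      have hnF : n - p < F.toNat := by
        have h' : n < p + F.toNat := by exact_mod_cast hlt
        omega
      apply hmin (n - p) hnF
      rw [pvSingletonPrefix, List.head?_drop, List.getElem?_drop]
      have : p + (n - p) = n := by omega
      rw [this, List.getElem?_eq_getElem hn, hc]


theorem pvLoop (cs : List Char) (n : Nat) : ∀ j, j ≤ (pvCommaIdx cs).length →
    pvLoopA cs n (pvPrev (pvCommaIdx cs) j) =
      if (pvCommaIdx cs).length < j + n then none
      else some (pvPrev (pvCommaIdx cs) (j + n)) := by
  induction n with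
  | zero =>
    intro j hj
    simp [pvLoopA, Nat.not_lt.2 hj]
  | succ n ih =>
    intro j hj
    obtain ⟨p, hpcast, hple⟩ : ∃ p : Nat, pvPrev (pvCommaIdx cs) j + 1 = (p : Int) ∧ p ≤ cs.length := by
      rcases Nat.eq_zero_or_pos j with rfl | hjpos
      · exact ⟨0, by simp [pvPrev], Nat.zero_le _⟩
      · have hj1 : j - 1 < (pvCommaIdx cs).length := by omega
        have hmem : (pvCommaIdx cs).getD (j-1) 0 ∈ pvCommaIdx cs := by
          rw [List.getD_eq_getElem?_getD, List.getElem?_eq_getElem hj1]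
          exact List.getElem_mem _
        obtain ⟨m, hm, hcast, _⟩ := (pvCommaIdx_mem cs _).1 hmem
        refine ⟨m + 1, ?_, by omega⟩
        unfold pvPrev
        rw [if_neg (Nat.pos_iff_ne_zero.1 hjpos), hcast]
        push_cast; ring
    have hfind : PySem.Chars.findFrom cs [','] (pvPrev (pvCommaIdx cs) j + 1) =
        ((pvCommaIdx cs).drop j).headD (-1) := by
      rw [hpcast, pvFindNext cs p hple, ← pvFilterDrop (pvCommaIdx cs) (pvCommaIdx_pairwise cs)
        (pvCommaIdx_nonneg cs) j hj]
      congr 1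
      apply List.filter_congr
      intro x _
      simp [← hpcast]
    rcases Nat.lt_or_ge j (pvCommaIdx cs).length with hlt | hge
    · have hhead : ((pvCommaIdx cs).drop j).headD (-1) = (pvCommaIdx cs)[j] := by
        rw [List.headD_eq_head?_getD, List.head?_drop, List.getElem?_eq_getElem hlt]
        rfl
      have hnn : 0 ≤ (pvCommaIdx cs)[j] :=
        pvCommaIdx_nonneg cs _ (List.getElem_mem _)
      have hne : ¬ ((pvCommaIdx cs)[j] = -1) := by omega
      have hstep : pvLoopA cs (n+1) (pvPrev (pvCommaIdx cs) j) =
          pvLoopA cs n ((pvCommaIdx cs)[j]) := by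
        simp only [pvLoopA, hfind, hhead, if_neg hne]
      rw [hstep]
      have hpv : (pvCommaIdx cs)[j] = pvPrev (pvCommaIdx cs) (j+1) := by
        simp [pvPrev, List.getD_eq_getElem?_getD, List.getElem?_eq_getElem hlt]
      rw [hpv, ih (j+1) (by omega)]
      have : j + 1 + n = j + (n + 1) := by omega
      rw [this]
    · have hj' : j = (pvCommaIdx cs).length := by omega
      have hhead : ((pvCommaIdx cs).drop j).headD (-1) = -1 := by
        rw [List.drop_of_length_le (by omega)]; rfl
      have hcond : (pvCommaIdx cs).length < j + (n+1) := by omega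
      have hnone : pvLoopA cs (n+1) (pvPrev (pvCommaIdx cs) j) = none := by
        simp only [pvLoopA, hfind, hhead]
        simp
      rw [hnone, if_pos hcond]

-- ===== VERDICT =====
theorem get_data_until_kth_comma_spec : Claim_unchanged_get_data_until_kth_comma := by
  intro s k c _ hnD
  by_cases hk : k ≤ 0
  · -- the loop body never runs: index stays -1
    have h0 : k.toNat = 0 := Int.toNat_of_nonpos hk
    have hB : get_data_until_kth_comma_alt s k c = "" := by
      simp [get_data_until_kth_comma_alt, if_pos hk]
    rw [hB]
    cases c with
    | true =>
      have hA : get_data_until_kth_comma s k true =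
          String.ofList (PySem.List.slice s.toList none (some 0)) := by
        simp [get_data_until_kth_comma, h0, pvLoopA]
      rw [hA, PySem.List.slice_to s.toList (le_refl (0:Int))]
      simp
    | false =>
      have hA : get_data_until_kth_comma s k false =
          String.ofList (PySem.List.slice s.toList none (some (-1))) := by
        simp [get_data_until_kth_comma, h0, pvLoopA]
      have hlen : s.toList.length ≤ 1 := by
        by_contra h
        exact hnD ⟨hk, rfl, by omega⟩
      rw [hA, PySem.List.slice_to_neg_one]
      have hnil : s.toList.dropLast = [] := by
        cases hcs : s.toList with
        | nil => rfl
        | cons a t =>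
          rw [hcs] at hlen
          simp at hlen
          simp [hlen]
      rw [hnil]
  · -- k ≥ 1: run the loop lemma from j = 0
    push_neg at hk
    have hknat : k = (k.toNat : Int) := (Int.toNat_of_nonneg (by omega)).symm
    have hloop := pvLoop s.toList k.toNat 0 (Nat.zero_le _)
    have hprev0 : pvPrev (pvCommaIdx s.toList) 0 = -1 := by simp [pvPrev]
    rw [hprev0] at hloop
    simp only [Nat.zero_add] at hloop
    unfold get_data_until_kth_comma get_data_until_kth_comma_alt
    rw [hloop, if_neg (by omega : ¬ k ≤ 0)]
    by_cases hlen : (pvCommaIdx s.toList).length < k.toNat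
    · have hlen' : ((pvCommaIdx s.toList).length : Int) < k := by
        rw [hknat]; exact_mod_cast hlen
      rw [if_pos hlen, if_pos hlen']
    · have hlen' : ¬ ((pvCommaIdx s.toList).length : Int) < k := by
        rw [hknat]; intro h; exact hlen (by exact_mod_cast h)
      rw [if_neg hlen, if_neg hlen']
      have hg : PySem.List.pyGetD (pvCommaIdx s.toList) (k - 1) 0 =
          (pvCommaIdx s.toList).getD (k.toNat - 1) 0 := by
        rw [PySem.List.pyGetD_of_nonneg _ _ (by omega : (0:Int) ≤ k - 1)]
        congr 1
        omega
      have hp : pvPrev (pvCommaIdx s.toList) k.toNat = (pvCommaIdx s.toList).getD (k.toNat - 1) 0 := by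
        unfold pvPrev
        rw [if_neg (by omega : ¬ k.toNat = 0)]
      cases c <;> simp [hg, hp]

theorem get_data_until_kth_comma_changed : Claim_changed_get_data_until_kth_comma := by
  unfold Claim_changed_get_data_until_kth_comma; decide

theorem get_data_until_kth_comma_tight : Claim_exact_get_data_until_kth_comma := by
  intro s k c _ hD
  obtain ⟨hk, hc, hlen⟩ := hD
  subst hc
  have hA : get_data_until_kth_comma s k false =
      String.ofList s.toList.dropLast := by
    have h0 : k.toNat = 0 := Int.toNat_of_nonpos hk
    simp [get_data_until_kth_comma, h0, pvLoopA, PySem.List.slice_to_neg_one]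
  have hB : get_data_until_kth_comma_alt s k false = "" := by
    simp [get_data_until_kth_comma_alt, if_pos hk]
  rw [hA, hB]
  intro heq
  have h1 := congrArg String.toList heq
  simp only [String.toList_ofList] at h1
  have h2 := congrArg List.length h1
  simp only [List.length_dropLast, show ("" : String).toList = [] from rfl,
    List.length_nil] at h2
  omega
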